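-- pv_equiv track=rewrite | github.com/SoseiHeptares/smizip | smizip/scripts/find_best_ngrams.py | create_encoding
-- ===== SOURCE A (Python) =====
-- def create_encoding(singlechars, multichars):
--     """Return a list of 255 strings representing the encoded ngrams"""
--
--     encoding = [""] * 256
--
--     # It's nice to encode the single chars under their ASCII location
--     for char in singlechars:
--         encoding[ord(char)] = char
--
--     # Let's encode the rest in the order in which they were provided (i.e. found)
--     idx = 0
--     for ngram in multichars:
--         while encoding[idx]:
--             idx += 1
--         encoding[idx] = ngram
--     return encoding
-- ===== SOURCE B (Python) =====
-- def create_encoding(singlechars, multichars):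
--     """Return a list of 255 strings representing the encoded ngrams"""
--     slots = {ord(c): c for c in singlechars}
--     queue = [m for m in multichars if m]
--     out = []
--     k = 0
--     for i in range(256):
--         c = slots.get(i)
--         if c is not None:
--             out.append(c)
--         elif k < len(queue):
--             out.append(queue[k])
--             k += 1
--         else:
--             out.append("")
--     return out
-- ===== Notes on version B (the rewrite author's own statement) =====
-- stated objective: alternative
-- what changed: A mutates a 256-slot array, iterating over the multichar ngrams and scanning for the next empty slot with an advancing pointer; B inverts the loops: it builds a dict of singles keyed by ord, filters the nonempty ngrams into a queue, and constructs the output list in one pass over the 256 positions, emitting the dict entry or pulling the next queued ngram.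
import Mathlib
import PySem

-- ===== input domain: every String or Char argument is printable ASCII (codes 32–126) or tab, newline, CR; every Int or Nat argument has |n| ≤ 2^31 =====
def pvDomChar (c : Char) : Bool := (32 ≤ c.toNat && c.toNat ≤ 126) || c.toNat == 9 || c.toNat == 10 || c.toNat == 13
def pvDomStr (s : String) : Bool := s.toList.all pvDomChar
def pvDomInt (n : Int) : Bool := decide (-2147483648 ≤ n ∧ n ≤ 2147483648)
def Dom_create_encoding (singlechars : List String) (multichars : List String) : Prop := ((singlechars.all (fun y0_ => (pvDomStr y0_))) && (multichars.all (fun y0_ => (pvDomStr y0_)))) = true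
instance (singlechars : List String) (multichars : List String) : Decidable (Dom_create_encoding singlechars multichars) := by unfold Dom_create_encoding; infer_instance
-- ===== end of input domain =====

-- B inverts A's loop structure: instead of mutating a 256-slot array and scanning for empty slots
-- per ngram, it builds a dict of singles keyed by ord and emits the output in one pass over the
-- 256 positions, pulling nonempty ngrams from a queue. Return values agree on all inputs where the
-- Python A returns (Pre_ excludes exactly A's raising inputs).

-- ord(c): Python raises TypeError unless c is a single character (such inputs are outside Pre_; 0 is a placeholder there)
def pvOrd (c : String) : Nat :=
  match c.toList with
  | [ch] => ch.toNat
  | _ => 0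

-- ===== PORT A =====
-- `for char in singlechars: encoding[ord(char)] = char`
def ceA_singles : List String → List String → List String
  | enc, [] => enc
  | enc, c :: rest => ceA_singles (enc.set (pvOrd c) c) rest

-- `while encoding[idx]: idx += 1`; reaching 256 is Python's IndexError (outside Pre_), modelled by returning 256
def ceA_find (enc : List String) (idx : Nat) : Nat :=
  if idx < 256 then
    if enc.getD idx "" ≠ "" then ceA_find enc (idx + 1) else idx
  else idx
termination_by 256 - idx

-- `for ngram in multichars: while …; encoding[idx] = ngram`
def ceA_fill (enc : List String) (idx : Nat) : List String → List String
  | [] => enc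
  | ng :: rest =>
      let j := ceA_find enc idx
      ceA_fill (enc.set j ng) j rest

def create_encoding (singlechars : List String) (multichars : List String) : List String :=
  ceA_fill (ceA_singles (List.replicate 256 "") singlechars) 0 multichars

-- ===== PORT B =====
-- `for i in range(256): c = slots.get(i); if c is not None: out.append(c) elif k < len(queue): …`
def ceB_build (slots : PySem.Dict Nat String) (queue : List String) : List Nat → Nat → List String
  | [], _ => []
  | i :: is, k =>
      match slots.get? i with
      | some c => c :: ceB_build slots queue is k
      | none =>
          if k < queue.length then queue.getD k "" :: ceB_build slots queue is (k + 1)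
          else "" :: ceB_build slots queue is k

def create_encoding_alt (singlechars : List String) (multichars : List String) : List String :=
  let slots := singlechars.foldl (fun d c => d.insert (pvOrd c) c) PySem.Dict.empty
  let queue := multichars.filter (fun m => m ≠ "")
  ceB_build slots queue (List.range 256) 0

-- ===== PRECONDITION & SPEC =====
-- Pre_ excludes exactly the inputs where the Python A raises: a non-single-character entry in singlechars
-- (TypeError from ord), and inputs whose nonempty multichars overflow the free slots — or exactly fill them
-- with a further (necessarily empty) entry following — where the while-scan runs past index 255 (IndexError).
def Pre_create_encoding (singlechars : List String) (multichars : List String) : Prop :=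
  (∀ c ∈ singlechars, c.toList.length = 1) ∧
  ((multichars.filter (· ≠ "")).length < 256 - (singlechars.map pvOrd).dedup.length
   ∨ ((multichars.filter (· ≠ "")).length = 256 - (singlechars.map pvOrd).dedup.length
      ∧ multichars.getLast? ≠ some ""))
instance (singlechars : List String) (multichars : List String) : Decidable (Pre_create_encoding singlechars multichars) := by unfold Pre_create_encoding; infer_instance

def pvWitness_create_encoding : List String × List String := (["a", "b"], ["ab", "cd", "", "e"])

def Spec_create_encoding (singlechars : List String) (multichars : List String) (out : List String) : Prop := out = create_encoding_alt singlechars multichars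
instance (singlechars : List String) (multichars : List String) (out : List String) : Decidable (Spec_create_encoding singlechars multichars out) := by unfold Spec_create_encoding; infer_instance

-- ===== CLAIM (what is proved, stated in full; the proofs are below) =====
def Claim_equal_create_encoding : Prop := ∀ (singlechars : List String) (multichars : List String), Dom_create_encoding singlechars multichars → Pre_create_encoding singlechars multichars → Spec_create_encoding singlechars multichars (create_encoding singlechars multichars)

-- ===== LEMMAS AND PROOFS =====

-- common normal form: walk the array once, filling empty slots from the queue
def mergeFill : List String → List String → List String
  | [], _ => []
  | e :: es, q =>
      if e ≠ "" then e :: mergeFill es q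
      else
        match q with
        | [] => "" :: mergeFill es []
        | x :: xs => x :: mergeFill es xs

lemma mergeFill_nil : ∀ es, mergeFill es [] = es := by
  intro es
  induction es with
  | nil => rfl
  | cons e es ih =>
      by_cases h : e = ""
      · subst h; simp [mergeFill, ih]
      · simp [mergeFill, h, ih]

lemma mergeFill_full : ∀ es q, (∀ e ∈ es, e ≠ "") → mergeFill es q = es := by
  intro es
  induction es with
  | nil => intro q _; rfl
  | cons e es ih =>
      intro q h
      have he : e ≠ "" := h e (List.mem_cons_self ..)
      simp only [mergeFill, if_pos he]
      rw [ih q (fun x hx => h x (List.mem_cons_of_mem _ hx))]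

-- inserting x at the least empty slot commutes with mergeFill
lemma mergeFill_set (x : String) (hx : x ≠ "") : ∀ (es : List String) (j : Nat) (xs : List String),
    j < es.length → es.getD j "" = "" → (∀ k, k < j → es.getD k "" ≠ "") →
    mergeFill es (x :: xs) = mergeFill (es.set j x) xs := by
  intro es
  induction es with
  | nil => intro j xs h; simp at h
  | cons e es ih =>
      intro j xs hj hE hmin
      cases j with
      | zero =>
          have he : e = "" := by simpa using hE
          subst he
          simp [mergeFill, hx]
      | succ j =>
          have he : e ≠ "" := by simpa using hmin 0 (Nat.succ_pos _)
          have hE' : es.getD j "" = "" := by simpa using hE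
          have hj' : j < es.length := by simpa using hj
          have hmin' : ∀ k, k < j → es.getD k "" ≠ "" := by
            intro k hk
            simpa using hmin (k + 1) (by omega)
          simp only [List.set_cons_succ, mergeFill, if_pos he]
          rw [ih j xs hj' hE' hmin']

lemma ceA_find_at_256 (enc : List String) : ceA_find enc 256 = 256 := by
  rw [ceA_find]; simp

-- ceA_find's result: everything before it is nonempty, and it is an empty slot unless it is 256
lemma ceA_find_spec (enc : List String) : ∀ n idx, 256 - idx ≤ n → idx ≤ 256 →
    idx ≤ ceA_find enc idx ∧ ceA_find enc idx ≤ 256 ∧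
    (∀ k, idx ≤ k → k < ceA_find enc idx → enc.getD k "" ≠ "") ∧
    (ceA_find enc idx < 256 → enc.getD (ceA_find enc idx) "" = "") := by
  intro n
  induction n with
  | zero =>
      intro idx h0 hle
      have : idx = 256 := by omega
      subst this
      rw [ceA_find_at_256]
      refine ⟨le_rfl, le_rfl, fun k h1 h2 => absurd h2 (by omega), fun h => absurd h (by omega)⟩
  | succ n ih =>
      intro idx h hle
      by_cases h256 : idx < 256
      · rw [ceA_find, if_pos h256]
        by_cases hne : enc.getD idx "" ≠ ""
        · rw [if_pos hne]
          obtain ⟨h1, h2, h3, h4⟩ := ih (idx + 1) (by omega) (by omega)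
          refine ⟨by omega, h2, ?_, h4⟩
          intro k hk1 hk2
          rcases Nat.eq_or_lt_of_le hk1 with h | h
          · subst h; exact hne
          · exact h3 k h hk2
        · rw [if_neg hne]
          refine ⟨le_rfl, by omega, by omega, fun _ => by simpa using hne⟩
      · have : idx = 256 := by omega
        subst this
        rw [ceA_find_at_256]
        refine ⟨le_rfl, le_rfl, fun k h1 h2 => absurd h2 (by omega), fun h => absurd h (by omega)⟩

-- ceA_fill only looks at idx through ceA_find
lemma ceA_fill_congr (enc : List String) (i i' : Nat) (h : ceA_find enc i = ceA_find enc i') :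
    ∀ m, ceA_fill enc i m = ceA_fill enc i' m := by
  intro m
  cases m with
  | nil => rfl
  | cons ng rest => simp only [ceA_fill, h]

-- find is idempotent: find (find idx) = find idx
lemma ceA_find_idem (enc : List String) (idx : Nat) (hle : idx ≤ 256) :
    ceA_find enc (ceA_find enc idx) = ceA_find enc idx := by
  obtain ⟨h1, h2, h3, h4⟩ := ceA_find_spec enc 256 idx (by omega) hle
  rcases Nat.lt_or_ge (ceA_find enc idx) 256 with h | h
  · rw [ceA_find, if_pos h, if_neg (by simpa [List.getD] using h4 h)]
  · have : ceA_find enc idx = 256 := by omega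
    rw [this, ceA_find_at_256]

-- find skips a prefix of nonempty slots
lemma ceA_find_skip (enc : List String) : ∀ d i, i + d ≤ 256 →
    (∀ k, i ≤ k → k < i + d → enc.getD k "" ≠ "") → ceA_find enc i = ceA_find enc (i + d) := by
  intro d
  induction d with
  | zero => intro i _ _; rfl
  | succ d ih =>
      intro i hle hne
      have h0 : enc.getD i "" ≠ "" := hne i le_rfl (by omega)
      rw [ceA_find, if_pos (by omega), if_pos h0]
      have := ih (i + 1) (by omega) (fun k hk1 hk2 => hne k (by omega) (by omega))
      rw [this]
      congr 1
      omega

-- empty ngrams are no-ops of the fill loop (the array has length 256)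
lemma ceA_fill_filter : ∀ (m enc : List String) (idx : Nat), enc.length = 256 → idx ≤ 256 →
    ceA_fill enc idx m = ceA_fill enc idx (m.filter (· ≠ "")) := by
  intro m
  induction m with
  | nil => intro enc idx _ _; rfl
  | cons ng rest ih =>
      intro enc idx hlen hidx
      obtain ⟨h1, h2, h3, h4⟩ := ceA_find_spec enc 256 idx (by omega) hidx
      by_cases hng : ng = ""
      · subst hng
        have hset : enc.set (ceA_find enc idx) "" = enc := by
          rcases Nat.lt_or_ge (ceA_find enc idx) 256 with h | h
          · have hE : enc.getD (ceA_find enc idx) "" = "" := h4 h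
            have hj : ceA_find enc idx < enc.length := by omega
            have : enc[ceA_find enc idx] = "" := by
              rw [List.getD_eq_getElem?_getD, List.getElem?_eq_getElem hj, Option.getD_some] at hE
              exact hE
            conv_lhs => rw [← this]
            exact List.set_getElem_self ..
          · exact List.set_eq_of_length_le (by omega)
        have hfc : ceA_find enc (ceA_find enc idx) = ceA_find enc idx := ceA_find_idem enc idx hidx
        simp only [List.filter_cons, ne_eq, not_true_eq_false, decide_false, ceA_fill, hset]
        rw [ceA_fill_congr enc _ idx hfc]
        exact ih enc idx hlen hidx
      · simp only [List.filter_cons, ne_eq, hng, not_false_eq_true, decide_true, ceA_fill]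
        exact ih (enc.set (ceA_find enc idx) ng) (ceA_find enc idx) (by simp [hlen]) h2

-- once the pointer reaches 256 every further write is a no-op
lemma ceA_fill_at_256 : ∀ (m enc : List String), enc.length ≤ 256 → ceA_fill enc 256 m = enc := by
  intro m
  induction m with
  | nil => intro enc _; rfl
  | cons ng rest ih =>
      intro enc hlen
      simp only [ceA_fill, ceA_find_at_256]
      rw [List.set_eq_of_length_le (by omega)]
      exact ih enc hlen

-- the fill loop from index 0 is mergeFill, on a queue of nonempty ngrams
lemma ceA_fill_eq_mergeFill : ∀ (q enc : List String), enc.length = 256 → (∀ x ∈ q, x ≠ "") →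
    ceA_fill enc 0 q = mergeFill enc q := by
  intro q
  induction q with
  | nil => intro enc _ _; simp [ceA_fill, mergeFill_nil]
  | cons x xs ih =>
      intro enc hlen hne
      have hx : x ≠ "" := hne x (List.mem_cons_self ..)
      obtain ⟨h1, h2, h3, h4⟩ := ceA_find_spec enc 256 0 (by omega) (by omega)
      set j := ceA_find enc 0 with hj
      rcases Nat.lt_or_ge j 256 with hlt | hge
      · -- write x at the least empty slot j
        have hE : enc.getD j "" = "" := h4 hlt
        have hmin : ∀ k, k < j → enc.getD k "" ≠ "" := fun k hk => h3 k (by omega) hk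
        have hjlen : j < enc.length := by omega
        have hgetj : (enc.set j x).getD j "" = x := by
          rw [List.getD_eq_getElem?_getD, List.getElem?_set_self (by omega)]
          rfl
        have hgetne : ∀ k, k ≠ j → (enc.set j x).getD k "" = enc.getD k "" := by
          intro k hk
          rw [List.getD_eq_getElem?_getD, List.getD_eq_getElem?_getD,
            List.getElem?_set_ne (by omega)]
        have hpre : ∀ k, k ≤ j → (enc.set j x).getD k "" ≠ "" := by
          intro k hk
          rcases Nat.eq_or_lt_of_le hk with h | h
          · subst h; rw [hgetj]; exact hx
          · rw [hgetne k (by omega)]; exact hmin k h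
        have hfind0 : ceA_find (enc.set j x) 0 = ceA_find (enc.set j x) (j + 1) := by
          have := ceA_find_skip (enc.set j x) (j + 1) 0 (by omega)
            (fun k hk1 hk2 => hpre k (by omega))
          simpa using this
        have hfindj : ceA_find (enc.set j x) j = ceA_find (enc.set j x) (j + 1) := by
          rw [ceA_find, if_pos hlt, if_pos (hpre j le_rfl)]
        rw [ceA_fill, ← hj, ceA_fill_congr (enc.set j x) j 0 (by rw [hfindj, hfind0])]
        rw [ih (enc.set j x) (by simp [hlen]) (fun y hy => hne y (List.mem_cons_of_mem _ hy))]
        rw [mergeFill_set x hx enc j xs hjlen hE hmin]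
      · -- the array is full: both sides leave it unchanged
        have hj256 : j = 256 := by omega
        have hfull : ∀ e ∈ enc, e ≠ "" := by
          intro e he
          obtain ⟨k, hk, hek⟩ := List.mem_iff_getElem.mp he
          have := h3 k (by omega) (by omega)
          rw [List.getD_eq_getElem?_getD, List.getElem?_eq_getElem hk, Option.getD_some, hek] at this
          exact this
        rw [ceA_fill, ← hj, hj256, List.set_eq_of_length_le (by omega),
          ceA_fill_at_256 xs enc (by omega), mergeFill_full enc (x :: xs) hfull]

-- B's position pass is mergeFill, given the dict mirrors the array
lemma ceB_build_eq_mergeFill (slots : PySem.Dict Nat String) (enc : List String)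
    (hlen : enc.length = 256)
    (hcorr : ∀ i, i < 256 → slots.get? i = if enc.getD i "" = "" then none else some (enc.getD i "")) :
    ∀ n a (q : List String) k, a + n = 256 → k ≤ q.length →
      ceB_build slots q (List.range' a n) k = mergeFill (enc.drop a) (q.drop k) := by
  intro n
  induction n with
  | zero =>
      intro a q k ha _
      rw [List.range', List.drop_eq_nil_of_le (by omega)]
      rfl
  | succ n ih =>
      intro a q k ha hk
      have halt : a < 256 := by omega
      have halen : a < enc.length := by omega
      rw [List.range'_succ, List.drop_eq_getElem_cons halen]
      have hga : enc.getD a "" = enc[a] := by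
        rw [List.getD_eq_getElem?_getD, List.getElem?_eq_getElem halen, Option.getD_some]
      by_cases hE : enc[a] = ""
      · have hnone : slots.get? a = none := by rw [hcorr a halt, if_pos (hga.trans hE)]
        rw [ceB_build, hnone]
        by_cases hq : k < q.length
        · have hdq : q.drop k = q[k] :: q.drop (k + 1) := List.drop_eq_getElem_cons hq
          have hqk : q.getD k "" = q[k] := by
            rw [List.getD_eq_getElem?_getD, List.getElem?_eq_getElem hq, Option.getD_some]
          simp only [if_pos hq, hdq, mergeFill, hE, ne_eq, not_true_eq_false, if_false, hqk]
          exact congrArg _ (ih (a + 1) q (k + 1) (by omega) (by omega))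
        · have hdq : q.drop k = [] := List.drop_eq_nil_of_le (by omega)
          simp only [if_neg hq, hdq, mergeFill, hE, ne_eq, not_true_eq_false, if_false]
          have := ih (a + 1) q k (by omega) hk
          rw [hdq] at this
          exact congrArg _ this
      · have hsome : slots.get? a = some enc[a] := by
          rw [hcorr a halt, if_neg (by rw [hga]; exact hE), hga]
        rw [ceB_build, hsome]
        simp only [mergeFill, hE, ne_eq, not_false_eq_true, if_true]
        exact congrArg _ (ih (a + 1) q k (by omega) hk)

-- the singles loop of A is a foldl; together with B's dict loop it keeps the correspondence invariant
lemma singles_corr : ∀ (s : List String) (enc : List String) (d : PySem.Dict Nat String),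
    enc.length = 256 → (∀ c ∈ s, c ≠ "" ∧ pvOrd c < 256) →
    (∀ i, i < 256 → d.get? i = if enc.getD i "" = "" then none else some (enc.getD i "")) →
    (ceA_singles enc s).length = 256 ∧
    (∀ i, i < 256 → (s.foldl (fun d c => d.insert (pvOrd c) c) d).get? i =
      if (ceA_singles enc s).getD i "" = "" then none else some ((ceA_singles enc s).getD i "")) ∧
    ceA_singles enc s = s.foldl (fun e c => e.set (pvOrd c) c) enc := by
  intro s
  induction s with
  | nil => intro enc d hlen _ hcorr; exact ⟨hlen, hcorr, rfl⟩
  | cons c rest ih =>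
      intro enc d hlen hs hcorr
      obtain ⟨hc, ho⟩ := hs c (List.mem_cons_self ..)
      have hlen' : (enc.set (pvOrd c) c).length = 256 := by simp [hlen]
      have hcorr' : ∀ i, i < 256 → (d.insert (pvOrd c) c).get? i =
          if (enc.set (pvOrd c) c).getD i "" = "" then none
          else some ((enc.set (pvOrd c) c).getD i "") := by
        intro i hi
        rw [PySem.Dict.get?_insert]
        by_cases h : i = pvOrd c
        · have hg : (enc.set (pvOrd c) c).getD (pvOrd c) "" = c := by
            rw [List.getD_eq_getElem?_getD, List.getElem?_set_self (by omega), Option.getD_some]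
          rw [if_pos h, h, hg, if_neg hc]
        · have : (enc.set (pvOrd c) c).getD i "" = enc.getD i "" := by
            rw [List.getD_eq_getElem?_getD, List.getD_eq_getElem?_getD,
              List.getElem?_set_ne (by omega)]
          rw [if_neg h, this, hcorr i hi]
      obtain ⟨g1, g2, g3⟩ := ih (enc.set (pvOrd c) c) (d.insert (pvOrd c) c) hlen'
        (fun y hy => hs y (List.mem_cons_of_mem _ hy)) hcorr'
      exact ⟨g1, g2, g3⟩

-- ===== VERDICT (by name: the statement is the Claim_ definition above) =====
theorem create_encoding_spec : Claim_equal_create_encoding := by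
  intro singlechars multichars hdom hpre
  unfold Spec_create_encoding create_encoding create_encoding_alt
  have hd1 : ∀ c ∈ singlechars, pvDomStr c = true := by
    have h := (Bool.and_eq_true _ _).mp hdom |>.1
    exact fun c hc => List.all_eq_true.mp h c hc
  have hsingle : ∀ c ∈ singlechars, c ≠ "" ∧ pvOrd c < 256 := by
    intro c hc
    have h1 := hpre.1 c hc
    obtain ⟨ch, hm⟩ := List.length_eq_one_iff.mp h1
    have hch : pvDomChar ch = true := by
      have := List.all_eq_true.mp (hd1 c hc) ch (by rw [hm]; exact List.mem_cons_self ..)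
      exact this
    have hlt : ch.toNat < 256 := by
      simp only [pvDomChar, Bool.or_eq_true, Bool.and_eq_true, decide_eq_true_eq, beq_iff_eq] at hch
      omega
    constructor
    · intro h
      rw [h] at hm
      simp at hm
    · have : pvOrd c = ch.toNat := by unfold pvOrd; rw [hm]
      omega
  have hcorr0 : ∀ i, i < 256 → (PySem.Dict.empty : PySem.Dict Nat String).get? i =
      if (List.replicate 256 "").getD i "" = "" then none
      else some ((List.replicate 256 "").getD i "") := by
    intro i hi
    have : (List.replicate 256 "").getD i "" = "" := by
      rw [List.getD_eq_getElem?_getD, List.getElem?_replicate, if_pos hi, Option.getD_some]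
    rw [this, if_pos rfl, PySem.Dict.get?_empty]
  obtain ⟨g1, g2, -⟩ := singles_corr singlechars (List.replicate 256 "") PySem.Dict.empty
    (List.length_replicate ..) hsingle hcorr0
  have hq : ∀ x ∈ multichars.filter (· ≠ ""), x ≠ "" := by
    intro x hx
    simpa using (List.mem_filter.mp hx).2
  rw [ceA_fill_filter multichars _ 0 g1 (by omega)]
  rw [ceA_fill_eq_mergeFill _ _ g1 hq]
  show mergeFill (ceA_singles (List.replicate 256 "") singlechars)
      (List.filter (fun x => decide (x ≠ "")) multichars) =
    ceB_build (List.foldl (fun d c => d.insert (pvOrd c) c) PySem.Dict.empty singlechars)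
      (List.filter (fun m => decide (m ≠ "")) multichars) (List.range 256) 0
  rw [List.range_eq_range',
    ceB_build_eq_mergeFill _ _ g1 g2 256 0 (List.filter (fun m => decide (m ≠ "")) multichars) 0
      rfl (by omega)]
  rw [List.drop_zero, List.drop_zero]
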